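-- pv_equiv track=rewrite | github.com/elevanaltd/octave-mcp | src/octave_mcp/core/hydrator.py | _parse_annotation_parts
-- ===== SOURCE A (Python) =====
-- def _parse_annotation_parts(annotation: str) -> list[str]:
--     """Parse annotation content into parts, handling quoted strings.
--
--     Args:
--         annotation: Raw annotation content like '"@ns/name","1.0.0"'
--
--     Returns:
--         List of unquoted parts
--     """
--     parts: list[str] = []
--     current = ""
--     in_quotes = False
--
--     for char in annotation:
--         if char == '"':
--             in_quotes = not in_quotes
--         elif char == "," and not in_quotes:
--             if current.strip():
--                 parts.append(current.strip())
--             current = ""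
--         else:
--             current += char
--
--     if current.strip():
--         parts.append(current.strip())
--
--     return parts
-- ===== SOURCE B (Python) =====
-- def _parse_annotation_parts(annotation: str) -> list[str]:
--     # Quote-parity decomposition: split the string on '"'; chunks at even
--     # positions are outside quotes (split them further on ','), chunks at odd
--     # positions are inside quotes (kept verbatim, commas and all). Seam-merge
--     # the sub-pieces, then strip each piece and keep the non-empty ones.
--     chunks = annotation.split('"')
--     pieces = [""]
--     for i, chunk in enumerate(chunks):
--         if i % 2 == 1:
--             pieces[-1] += chunk
--         else:
--             subs = chunk.split(',')
--             pieces[-1] += subs[0]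
--             pieces.extend(subs[1:])
--     return [p for p in (piece.strip() for piece in pieces) if p]
-- ===== Notes on version B (the rewrite author's own statement) =====
-- stated objective: faster
-- what changed: Replaces A's fused character-by-character split-and-clean loop (in_quotes flag, incremental string concatenation) by a quote-parity decomposition built on str.split: split the string on the quote character, comma-split only the even-indexed (outside-quote) chunks, keep odd-indexed chunks verbatim, seam-merge the sub-pieces, then strip and drop empties; the bulk scanning moves from a Python-level char loop into C-level str.split.
import Mathlib
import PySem

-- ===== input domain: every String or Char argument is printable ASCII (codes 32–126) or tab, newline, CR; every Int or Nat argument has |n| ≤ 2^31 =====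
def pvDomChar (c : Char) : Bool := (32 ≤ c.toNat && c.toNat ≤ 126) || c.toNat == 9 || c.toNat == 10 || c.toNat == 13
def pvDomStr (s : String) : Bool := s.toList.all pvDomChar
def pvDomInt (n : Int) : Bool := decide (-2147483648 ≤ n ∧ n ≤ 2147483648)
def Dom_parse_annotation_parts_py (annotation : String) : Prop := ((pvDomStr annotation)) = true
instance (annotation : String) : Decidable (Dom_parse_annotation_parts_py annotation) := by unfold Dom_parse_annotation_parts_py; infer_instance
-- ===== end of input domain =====

-- B replaces A's fused split-and-clean character loop by a quote-parity decomposition (split on the quote char, comma-split even chunks, seam-merge, strip/filter); measured faster (C-level str.split instead of a Python char loop).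


-- ===== PORT A =====
-- one fused loop: drop '"' (toggling in_quotes), commit stripped current at unquoted ','
def pvAStep (st : List (List Char) × List Char × Bool) (c : Char) :
    List (List Char) × List Char × Bool :=
  if c = '"' then (st.1, st.2.1, !st.2.2)
  else if c = ',' ∧ st.2.2 = false then
    (if PySem.Chars.strip st.2.1 ≠ [] then st.1 ++ [PySem.Chars.strip st.2.1] else st.1, [], st.2.2)
  else (st.1, st.2.1 ++ [c], st.2.2)

def parse_annotation_parts_py (annotation : String) : List String :=
  let st := annotation.toList.foldl pvAStep ([], [], false)
  let parts := if PySem.Chars.strip st.2.1 ≠ [] then st.1 ++ [PySem.Chars.strip st.2.1] else st.1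
  parts.map String.ofList

-- ===== PORT B =====
-- pieces[-1] += s
def pvAppendLast (ps : List (List Char)) (s : List Char) : List (List Char) :=
  ps.dropLast ++ [(ps.getLast?.getD []) ++ s]

-- loop body: odd chunks (inside quotes) extend the last piece verbatim;
-- even chunks are comma-split, the first sub-piece joins the last piece, the rest are appended
def pvBStep (ps : List (List Char)) (ic : Int × List Char) : List (List Char) :=
  if PySem.Int.mod ic.1 2 = 1 then pvAppendLast ps ic.2
  else
    let subs := ic.2.splitOn ','
    pvAppendLast ps (subs.headD []) ++ subs.tail

def parse_annotation_parts_py_alt (annotation : String) : List String :=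
  let chunks := annotation.toList.splitOn '"'
  let pieces := (PySem.List.enumerate chunks 0).foldl pvBStep [[]]
  ((pieces.map PySem.Chars.strip).filter (· ≠ [])).map String.ofList

-- ===== PRECONDITION & SPEC =====
def Spec_parse_annotation_parts_py (annotation : String) (out : List String) : Prop := out = parse_annotation_parts_py_alt annotation
instance (annotation : String) (out : List String) : Decidable (Spec_parse_annotation_parts_py annotation out) := by unfold Spec_parse_annotation_parts_py; infer_instance

-- ===== CLAIM (what is proved, stated in full; the proofs are below) =====
def Claim_equal_parse_annotation_parts_py : Prop := ∀ (annotation : String), Dom_parse_annotation_parts_py annotation → Spec_parse_annotation_parts_py annotation (parse_annotation_parts_py annotation)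

-- ===== LEMMAS AND PROOFS =====

-- reference: the raw pieces (quotes removed, unquoted commas as boundaries), built back-to-front
def pvPieces : List Char → Bool → List (List Char)
  | [], _ => [[]]
  | c :: tl, inq =>
    if c = '"' then pvPieces tl (!inq)
    else if c = ',' ∧ inq = false then [] :: pvPieces tl false
    else (pvPieces tl inq).modifyHead (c :: ·)

-- seam-merge of two piece lists
def pvMerge (xs ys : List (List Char)) : List (List Char) :=
  xs.dropLast ++ ys.modifyHead ((xs.getLast?.getD []) ++ ·)

-- pieces contributed by a chunk list, given the parity of the first chunk
def pvG : Bool → List (List Char) → List (List Char)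
  | _, [] => [[]]
  | false, c :: r => pvMerge (c.splitOn ',') (pvG true r)
  | true, c :: r => pvMerge [c] (pvG false r)

def pvCleanAll (ps : List (List Char)) : List (List Char) :=
  (ps.map PySem.Chars.strip).filter (· ≠ [])

def pvPost (st : List (List Char) × List Char × Bool) : List (List Char) :=
  if PySem.Chars.strip st.2.1 ≠ [] then st.1 ++ [PySem.Chars.strip st.2.1] else st.1

lemma pvPieces_nil (inq : Bool) : pvPieces [] inq = [[]] := rfl

lemma pvPieces_quote (tl : List Char) (inq : Bool) :
    pvPieces ('"' :: tl) inq = pvPieces tl (!inq) := by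
  simp [pvPieces]

lemma pvPieces_comma (tl : List Char) : pvPieces (',' :: tl) false = [] :: pvPieces tl false := by
  simp [pvPieces]

lemma pvPieces_other (c : Char) (tl : List Char) (inq : Bool) (hq : ¬ c = '"')
    (h : ¬ (c = ',' ∧ inq = false)) :
    pvPieces (c :: tl) inq = (pvPieces tl inq).modifyHead (c :: ·) := by
  simp only [pvPieces]
  rw [if_neg hq, if_neg h]

lemma pvMerge_nil_left (ys : List (List Char)) : pvMerge [[]] ys = ys := by
  cases ys <;> simp [pvMerge, List.modifyHead]

lemma pvMerge_ne_nil (xs ys : List (List Char)) (hy : ys ≠ []) : pvMerge xs ys ≠ [] := by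
  obtain ⟨y, ys', rfl⟩ := List.exists_cons_of_ne_nil hy
  simp [pvMerge, List.modifyHead]

lemma pvMerge_nil_right (ps : List (List Char)) (hps : ps ≠ []) : pvMerge ps [[]] = ps := by
  conv_rhs => rw [← List.dropLast_append_getLast hps]
  simp [pvMerge, List.getLast?_eq_getLast_of_ne_nil hps]

lemma pvMerge_nil_head (xs ys : List (List Char)) (hx : xs ≠ []) :
    pvMerge ([] :: xs) ys = [] :: pvMerge xs ys := by
  obtain ⟨x, xs', rfl⟩ := List.exists_cons_of_ne_nil hx
  simp [pvMerge]

lemma pvMerge_modifyHead (c : Char) (xs ys : List (List Char)) (hx : xs ≠ []) :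
    pvMerge (xs.modifyHead (c :: ·)) ys = (pvMerge xs ys).modifyHead (c :: ·) := by
  obtain ⟨x, xs', rfl⟩ := List.exists_cons_of_ne_nil hx
  cases xs' with
  | nil => cases ys <;> simp [pvMerge, List.modifyHead]
  | cons y ys' => simp [pvMerge, List.modifyHead]

lemma pvMerge_assoc (xs : List (List Char)) (h : List Char) (t zs : List (List Char)) :
    pvMerge (pvMerge xs (h :: t)) zs = pvMerge xs (pvMerge (h :: t) zs) := by
  cases t with
  | nil =>
      cases zs <;>
        simp [pvMerge, List.modifyHead, List.append_assoc]
  | cons t0 t1 =>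
      have hgl : ∃ g, (t0 :: t1).getLast? = some g := by
        cases hgl' : (t0 :: t1).getLast? with
        | none => simp [List.getLast?_eq_none_iff] at hgl'
        | some g => exact ⟨g, rfl⟩
      obtain ⟨g, hg⟩ := hgl
      cases zs <;> simp [pvMerge, List.modifyHead, List.append_assoc, hg]

lemma pvSplitOn_cons (a c : Char) (cs : List Char) :
    (c :: cs).splitOn a =
      if c = a then [] :: cs.splitOn a else (cs.splitOn a).modifyHead (c :: ·) := by
  simp only [List.splitOn, List.splitOnP_cons]
  by_cases h : c = a <;> simp [h]

lemma pvSplitOn_ne_nil (a : Char) (cs : List Char) : cs.splitOn a ≠ [] :=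
  List.splitOnP_ne_nil _ cs

lemma pvG_split (cs : List Char) : ∀ q : Bool, pvG q (cs.splitOn '"') = pvPieces cs q := by
  induction cs with
  | nil => intro q; cases q <;> simp [pvG, pvMerge_nil_left, pvPieces]
  | cons c tl ih =>
    intro q
    by_cases hq : c = '"'
    · subst hq
      rw [pvSplitOn_cons, if_pos rfl, pvPieces_quote]
      cases q <;> simp [pvG, pvMerge_nil_left, ih]
    · rw [pvSplitOn_cons, if_neg hq]
      obtain ⟨h0, r, hr⟩ := List.exists_cons_of_ne_nil (pvSplitOn_ne_nil '"' tl)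
      rw [hr]
      cases q with
      | true =>
          -- inside quotes: chunk kept verbatim
          simp only [List.modifyHead, pvG]
          rw [show pvMerge [c :: h0] (pvG false r) =
                (pvMerge [h0] (pvG false r)).modifyHead (c :: ·) from
              pvMerge_modifyHead c [h0] _ (by simp)]
          rw [show pvMerge [h0] (pvG false r) = pvG true (h0 :: r) from rfl, ← hr, ih]
          rw [pvPieces_other c tl true hq (by simp)]
      | false =>
          by_cases hc : c = ','
          · subst hc
            simp only [List.modifyHead, pvG]
            rw [pvSplitOn_cons, if_pos rfl]
            rw [pvMerge_nil_head _ _ (pvSplitOn_ne_nil ',' h0)]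
            rw [show pvMerge (h0.splitOn ',') (pvG true r) = pvG false (h0 :: r) from rfl,
              ← hr, ih, pvPieces_comma]
          · simp only [List.modifyHead, pvG]
            rw [pvSplitOn_cons, if_neg hc]
            rw [pvMerge_modifyHead c _ _ (pvSplitOn_ne_nil ',' h0)]
            rw [show pvMerge (h0.splitOn ',') (pvG true r) = pvG false (h0 :: r) from rfl,
              ← hr, ih, pvPieces_other c tl false hq (by simp [hc])]

lemma pvMod2 (j : Int) : PySem.Int.mod j 2 = j % 2 :=
  PySem.Int.mod_eq_emod_of_pos (by norm_num)

lemma pvFoldB (chunks : List (List Char)) :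
    ∀ (i : Int) (b : Bool), 0 ≤ i → PySem.Int.mod i 2 = (if b then 1 else 0) →
      ∀ ps : List (List Char), ps ≠ [] →
      (PySem.List.enumerate chunks i).foldl pvBStep ps = pvMerge ps (pvG b chunks) := by
  induction chunks with
  | nil =>
      intro i b _ _ ps hps
      rw [PySem.List.enumerate_nil, List.foldl_nil]
      cases b <;> rw [show pvG _ ([] : List (List Char)) = [[]] from rfl,
        pvMerge_nil_right ps hps]
  | cons c r ih =>
      intro i b hi hb ps hps
      have hb' : i % 2 = (if b then 1 else 0) := by rw [← pvMod2]; exact hb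
      have hnext : PySem.Int.mod (i + 1) 2 = (if !b then 1 else 0) := by
        rw [pvMod2]
        cases b with
        | true =>
            have h1 : i % 2 = 1 := by simpa using hb'
            simp only [Bool.not_true, Bool.false_eq_true, if_false]
            omega
        | false =>
            have h1 : i % 2 = 0 := by simpa using hb'
            simp only [Bool.not_false, if_true]
            omega
      rw [PySem.List.enumerate_cons, List.foldl_cons]
      cases b with
      | true =>
          have hcond : PySem.Int.mod i 2 = 1 := by simpa using hb
          have hstep : pvBStep ps (i, c) = pvMerge ps [c] := by
            simp only [pvBStep]
            rw [if_pos hcond]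
            rfl
          rw [hstep, ih (i + 1) false (by omega) (by simpa using hnext)
            _ (pvMerge_ne_nil ps [c] (by simp))]
          rw [show pvG true (c :: r) = pvMerge [c] (pvG false r) from rfl, pvMerge_assoc]
      | false =>
          have hcond : ¬ PySem.Int.mod i 2 = 1 := by
            have h0 : i % 2 = 0 := by simpa using hb'
            rw [pvMod2]; omega
          obtain ⟨h0, t, ht⟩ := List.exists_cons_of_ne_nil (pvSplitOn_ne_nil ',' c)
          have hstep : pvBStep ps (i, c) = pvMerge ps (c.splitOn ',') := by
            simp only [pvBStep]
            rw [if_neg hcond, ht]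
            simp [pvAppendLast, pvMerge, List.modifyHead, List.append_assoc]
          rw [hstep, ih (i + 1) true (by omega) (by simpa using hnext)
            _ (pvMerge_ne_nil ps _ (by rw [ht]; simp))]
          rw [show pvG false (c :: r) = pvMerge (c.splitOn ',') (pvG true r) from rfl,
            ht, pvMerge_assoc]

lemma pvCleanAll_cons (x : List Char) (ps : List (List Char)) :
    pvCleanAll (x :: ps)
      = (if PySem.Chars.strip x ≠ [] then [PySem.Chars.strip x] else []) ++ pvCleanAll ps := by
  simp only [pvCleanAll, List.map_cons, List.filter_cons]
  split_ifs with h1 h2 h3 <;> simp_all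

lemma pvModifyHead_nil_append (ps : List (List Char)) :
    ps.modifyHead ((([] : List Char)) ++ ·) = ps := by
  cases ps <;> simp [List.modifyHead]

lemma pvAchar (cs : List Char) :
    ∀ (p : List (List Char)) (cur : List Char) (inq : Bool),
      pvPost (cs.foldl pvAStep (p, cur, inq))
        = p ++ pvCleanAll ((pvPieces cs inq).modifyHead (cur ++ ·)) := by
  induction cs with
  | nil =>
      intro p cur inq
      simp only [List.foldl_nil, pvPost, pvPieces_nil, List.modifyHead, List.append_nil]
      rw [pvCleanAll_cons]
      split_ifs <;> simp [pvCleanAll]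
  | cons c tl ih =>
      intro p cur inq
      by_cases hq : c = '"'
      · subst hq
        rw [List.foldl_cons, show pvAStep (p, cur, inq) '"' = (p, cur, !inq) from by
          simp [pvAStep]]
        rw [ih, pvPieces_quote]
      · by_cases hc : c = ',' ∧ inq = false
        · obtain ⟨rfl, rfl⟩ := hc
          rw [List.foldl_cons, show pvAStep (p, cur, false) ','
              = (if PySem.Chars.strip cur ≠ [] then p ++ [PySem.Chars.strip cur] else p, [], false)
            from by simp [pvAStep]]
          rw [ih, pvModifyHead_nil_append, pvPieces_comma]
          simp only [List.modifyHead, List.append_nil]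
          rw [pvCleanAll_cons]
          split_ifs <;> simp [List.append_assoc]
        · rw [List.foldl_cons, show pvAStep (p, cur, inq) c = (p, cur ++ [c], inq) from by
            simp only [pvAStep]; rw [if_neg hq, if_neg hc]]
          rw [ih, pvPieces_other c tl inq hq hc]
          congr 1
          cases hp : pvPieces tl inq with
          | nil => simp [List.modifyHead]
          | cons a b => simp [List.modifyHead, List.append_assoc]

-- ===== VERDICT (by name: the statement is the Claim_ definition above) =====
theorem parse_annotation_parts_py_spec : Claim_equal_parse_annotation_parts_py := by
  intro annotation _
  show parse_annotation_parts_py annotation = parse_annotation_parts_py_alt annotation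
  have hA := pvAchar annotation.toList [] [] false
  rw [pvModifyHead_nil_append, List.nil_append] at hA
  have hB := pvFoldB (annotation.toList.splitOn '"') 0 false (by norm_num) (by decide)
    [[]] (by simp)
  rw [pvMerge_nil_left, pvG_split] at hB
  simp only [parse_annotation_parts_py, parse_annotation_parts_py_alt]
  rw [show (if PySem.Chars.strip (annotation.toList.foldl pvAStep ([], [], false)).2.1 ≠ []
        then (annotation.toList.foldl pvAStep ([], [], false)).1
          ++ [PySem.Chars.strip (annotation.toList.foldl pvAStep ([], [], false)).2.1]
        else (annotation.toList.foldl pvAStep ([], [], false)).1)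
      = pvPost (annotation.toList.foldl pvAStep ([], [], false)) from rfl]
  rw [hA, hB]
  rfl
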